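-- pv_equiv track=rewrite | github.com/teodorwisniewski/traning_python_morsels | Ex16_tags_equal_4Fevrier2020_bonus3.py | _cleaning_duplicates
-- ===== SOURCE A (Python) =====
-- def _cleaning_duplicates(aux_str: list):
--     out = []
--     lista_attributes = [el.split("=")[0] for el in aux_str ]
--     d = dict.fromkeys(lista_attributes, True)
--     for el in lista_attributes:
--         if d[el]:
--             for el2 in aux_str:
--                 if  el in el2:
--                     out.append(el2)
--                     d[el] = False
--                     break
--     return " ".join(out)
-- ===== SOURCE B (Python) =====
-- def _cleaning_duplicates(aux_str: list):
--     # element-major single pass: dedupe keys first, then scan the elements once,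
--     # recording the first containing element per key and dropping matched keys
--     keys = []
--     seen = set()
--     for el in aux_str:
--         k = el.split("=")[0]
--         if k not in seen:
--             seen.add(k)
--             keys.append(k)
--     first_match = {}
--     pending = keys
--     for s in aux_str:
--         if not pending:
--             break
--         still = []
--         for k in pending:
--             if k in s:
--                 first_match[k] = s
--             else:
--                 still.append(k)
--         pending = still
--     return " ".join(first_match[k] for k in keys if k in first_match)
-- ===== Notes on version B (the rewrite author's own statement) =====
-- stated objective: alternative
-- what changed: B swaps the loop nesting: instead of A's per-unique-key rescans of the whole list, B dedupes the keys once, then makes one element-major pass over the list recording in a dict the first element containing each still-unmatched key, and joins the dict values in key order.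
import Mathlib
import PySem

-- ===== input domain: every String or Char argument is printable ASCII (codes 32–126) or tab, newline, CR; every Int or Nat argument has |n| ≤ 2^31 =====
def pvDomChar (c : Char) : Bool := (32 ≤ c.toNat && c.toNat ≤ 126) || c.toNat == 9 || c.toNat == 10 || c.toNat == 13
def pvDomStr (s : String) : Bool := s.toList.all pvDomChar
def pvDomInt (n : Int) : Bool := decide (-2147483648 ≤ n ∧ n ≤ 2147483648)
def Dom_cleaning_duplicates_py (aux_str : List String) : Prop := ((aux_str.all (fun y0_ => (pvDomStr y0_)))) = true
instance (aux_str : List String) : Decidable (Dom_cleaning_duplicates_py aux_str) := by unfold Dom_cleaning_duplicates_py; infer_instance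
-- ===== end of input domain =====

-- B swaps A's loop nesting: keys are deduped once, then ONE element-major pass records the
-- first containing element per still-pending key in a dict; same return value, structurally different traversal.


-- ===== PORT A =====
-- el.split("=")[0]; split? with sep ≠ "" is some, never [], so neither .getD ever fires (exact)
def pvKeyOf (el : String) : String := (PySem.List.pyGet? ((PySem.Str.split? el "=").getD []) 0).getD ""

-- A's inner 'for el2 in aux_str: if el in el2: …; break' — returns the element the break fired on
def pvInnerA (el : String) : List String → Option String
  | [] => none
  | el2 :: rest => if PySem.Str.isIn el el2 then some el2 else pvInnerA el rest

def cleaning_duplicates_py (aux_str : List String) : String :=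
  let lista_attributes := aux_str.map (fun el => pvKeyOf el)
  -- d = dict.fromkeys(lista_attributes, True)
  let d : PySem.Dict String Bool :=
    lista_attributes.foldl (fun d k => d.insert k true) PySem.Dict.empty
  let st := lista_attributes.foldl
    (fun (st : List String × PySem.Dict String Bool) el =>
      if st.2.getD el false then     -- d[el]: el is always a key of d, so getD is exact
        match pvInnerA el aux_str with
        | some el2 => (st.1 ++ [el2], st.2.insert el false)
        | none => st
      else st) ([], d)
  PySem.Str.join " " st.1

-- ===== PORT B =====
def cleaning_duplicates_py_alt (aux_str : List String) : String :=
  -- first loop: dedupe the keys (seen : set, keys : list)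
  let p := aux_str.foldl
    (fun (p : PySem.Set String × List String) el =>
      if PySem.Set.contains p.1 (pvKeyOf el) then p
      else (PySem.Set.add p.1 (pvKeyOf el), p.2 ++ [pvKeyOf el]))
    (PySem.Set.empty, [])
  let keys := p.2
  -- second loop: one element-major pass; pending = still-unmatched keys; 'if not pending: break'
  -- is ported as a skip guard, exact because an empty pending list stays empty forever
  let st := aux_str.foldl
    (fun (st : PySem.Dict String String × List String) s =>
      if st.2 = [] then st
      else st.2.foldl
        (fun (q : PySem.Dict String String × List String) k =>
          if PySem.Str.isIn k s then (q.1.insert k s, q.2) else (q.1, q.2 ++ [k]))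
        (st.1, []))
    (PySem.Dict.empty, keys)
  let first_match := st.1
  PySem.Str.join " " (keys.filterMap (fun k => first_match.get? k))

-- ===== PRECONDITION & SPEC =====
def Spec_cleaning_duplicates_py (aux_str : List String) (out : String) : Prop := out = cleaning_duplicates_py_alt aux_str
instance (aux_str : List String) (out : String) : Decidable (Spec_cleaning_duplicates_py aux_str out) := by unfold Spec_cleaning_duplicates_py; infer_instance

-- ===== CLAIM (what is proved, stated in full; the proofs are below) =====
def Claim_equal_cleaning_duplicates_py : Prop := ∀ (aux_str : List String), Dom_cleaning_duplicates_py aux_str → Spec_cleaning_duplicates_py aux_str (cleaning_duplicates_py aux_str)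

-- ===== LEMMAS AND PROOFS =====

-- canonical ordered dedup with an explicit 'seen' accumulator
def pvDD : List String → List String → List String
  | [], _ => []
  | k :: ks, seen => if k ∈ seen then pvDD ks seen else k :: pvDD ks (k :: seen)

-- A's outer loop, abstracted: process keys left to right, 'done' = keys already matched
def pvScan (f : String → Option String) : List String → List String → List String
  | [], _ => []
  | k :: ks, done =>
    if k ∈ done then pvScan f ks done
    else match f k with
      | some x => x :: pvScan f ks (k :: done)
      | none => pvScan f ks done

theorem pvDD_congr (ks : List String) : ∀ s t : List String,
    (∀ x, x ∈ s ↔ x ∈ t) → pvDD ks s = pvDD ks t := by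
  induction ks with
  | nil => intro s t _; rfl
  | cons k ks ih =>
    intro s t h
    simp only [pvDD]
    by_cases hk : k ∈ s
    · rw [if_pos hk, if_pos ((h k).mp hk)]; exact ih s t h
    · rw [if_neg hk, if_neg (fun hm => hk ((h k).mpr hm))]
      congr 1
      exact ih _ _ (by intro x; simp [h x])

-- ===== B, first loop: it computes pvDD =====

theorem pvB_keys (l : List String) : ∀ (q : List String),
    (l.foldl (fun (p : PySem.Set String × List String) el =>
      if PySem.Set.contains p.1 (pvKeyOf el) then p
      else (PySem.Set.add p.1 (pvKeyOf el), p.2 ++ [pvKeyOf el])) (q, q)).2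
    = q ++ pvDD (l.map (fun el => pvKeyOf el)) q := by
  induction l with
  | nil => intro q; simp [pvDD]
  | cons el l ih =>
    intro q
    simp only [List.foldl_cons, List.map_cons, pvDD]
    by_cases hk : pvKeyOf el ∈ q
    · have hc : PySem.Set.contains q (pvKeyOf el) = true := by simpa using hk
      simp only [hc, if_pos hk, if_true]
      simpa using ih q
    · have hc : PySem.Set.contains q (pvKeyOf el) = false := by
        cases hcc : PySem.Set.contains q (pvKeyOf el) with
        | false => rfl
        | true => exact absurd ((PySem.Set.contains_iff q (pvKeyOf el)).mp hcc) hk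
      have hadd : PySem.Set.add q (pvKeyOf el) = q ++ [pvKeyOf el] := by
        simp [PySem.Set.add, hc, hk]
      simp only [hc, hadd, if_neg hk, Bool.false_eq_true, if_false]
      have := ih (q ++ [pvKeyOf el])
      rw [this]
      rw [pvDD_congr (l.map (fun el => pvKeyOf el)) (q ++ [pvKeyOf el]) (pvKeyOf el :: q)
        (by intro x; simp [or_comm])]
      simp

-- ===== B, second loop =====

-- inner pass over pending: the dict afterwards
theorem pvI1 (s k : String) : ∀ (pending : List String) (m : PySem.Dict String String) (acc : List String),
    ((pending.foldl
        (fun (q : PySem.Dict String String × List String) k =>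
          if PySem.Str.isIn k s then (q.1.insert k s, q.2) else (q.1, q.2 ++ [k]))
        (m, acc)).1).get? k
    = if k ∈ pending ∧ PySem.Str.isIn k s = true then some s else m.get? k := by
  intro pending
  induction pending with
  | nil => intro m acc; simp
  | cons j rest ih =>
    intro m acc
    simp only [List.foldl_cons]
    by_cases hj : PySem.Str.isIn j s = true
    · rw [if_pos hj, ih]
      by_cases hkj : k = j
      · subst hkj
        have hR : k ∈ k :: rest ∧ PySem.Str.isIn k s = true := ⟨List.mem_cons_self, hj⟩
        rw [if_pos hR]
        by_cases hr : k ∈ rest ∧ PySem.Str.isIn k s = true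
        · rw [if_pos hr]
        · rw [if_neg hr, PySem.Dict.get?_insert_self]
      · rw [PySem.Dict.get?_insert_of_ne m s hkj]
        simp only [List.mem_cons, hkj, false_or]
    · rw [if_neg hj, ih]
      by_cases hkj : k = j
      · subst hkj
        have hf : PySem.Chars.isIn k.toList s.toList = false := by simpa using hj
        simp [hf]
      · simp only [List.mem_cons, hkj, false_or]

-- inner pass over pending: the surviving pending keys
theorem pvI2 (s : String) : ∀ (pending : List String) (m : PySem.Dict String String) (acc : List String),
    ((pending.foldl
        (fun (q : PySem.Dict String String × List String) k =>
          if PySem.Str.isIn k s then (q.1.insert k s, q.2) else (q.1, q.2 ++ [k]))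
        (m, acc)).2)
    = acc ++ pending.filter (fun k => !(PySem.Str.isIn k s)) := by
  intro pending
  induction pending with
  | nil => intro m acc; simp
  | cons j rest ih =>
    intro m acc
    simp only [List.foldl_cons, List.filter_cons]
    by_cases hj : PySem.Str.isIn j s = true
    · have hj' : PySem.Chars.isIn j.toList s.toList = true := by simpa using hj
      rw [if_pos hj, ih]
      simp [hj']
    · have hf : PySem.Chars.isIn j.toList s.toList = false := by simpa using hj
      rw [if_neg hj, ih]
      simp [hf]

-- outer element-major pass: first_match.get? k = first containing element, for pending keys
theorem pvB2 (k : String) : ∀ (l : List String) (m : PySem.Dict String String) (pending : List String),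
    (∀ j ∈ pending, m.get? j = none) →
    ((l.foldl
        (fun (st : PySem.Dict String String × List String) s =>
          if st.2 = [] then st
          else st.2.foldl
            (fun (q : PySem.Dict String String × List String) k =>
              if PySem.Str.isIn k s then (q.1.insert k s, q.2) else (q.1, q.2 ++ [k]))
            (st.1, [])) (m, pending)).1).get? k
    = match m.get? k with
      | some v => some v
      | none => if k ∈ pending then pvInnerA k l else none := by
  intro l
  induction l with
  | nil =>
    intro m pending _
    cases h : m.get? k <;> simp [h, pvInnerA]
  | cons s l ih =>
    intro m pending hnone
    simp only [List.foldl_cons]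
    by_cases hp : pending = []
    · subst hp
      rw [if_pos rfl, ih m [] hnone]
      cases h : m.get? k <;> simp [h]
    · rw [if_neg hp]
      have hstep :
          ((pending.foldl
            (fun (q : PySem.Dict String String × List String) k =>
              if PySem.Str.isIn k s then (q.1.insert k s, q.2) else (q.1, q.2 ++ [k]))
            (m, [])))
          = (((pending.foldl
              (fun (q : PySem.Dict String String × List String) k =>
                if PySem.Str.isIn k s then (q.1.insert k s, q.2) else (q.1, q.2 ++ [k]))
              (m, []))).1,
             pending.filter (fun k => !(PySem.Str.isIn k s))) := by
        have h2 := pvI2 s pending m []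
        rw [List.nil_append] at h2
        rw [← h2]
      rw [hstep]
      rw [ih _ _ (by
        intro j hj
        rw [pvI1]
        rcases List.mem_filter.mp hj with ⟨hjp, hjs⟩
        have hjs' : PySem.Str.isIn j s = false := by simpa using hjs
        rw [if_neg (by intro hc; rw [hc.2] at hjs'; cases hjs')]
        exact hnone j hjp)]
      rw [pvI1]
      cases hm : m.get? k with
      | some v =>
        have hknp : k ∉ pending := fun hkp => by
          have := hnone k hkp; rw [hm] at this; cases this
        rw [if_neg (by intro hc; exact hknp hc.1)]
      | none =>
        by_cases hkp : k ∈ pending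
        · by_cases hin : PySem.Str.isIn k s = true
          · have hin' : PySem.Chars.isIn k.toList s.toList = true := by simpa using hin
            have hR : k ∈ pending ∧ PySem.Str.isIn k s = true := ⟨hkp, hin⟩
            rw [if_pos hR]
            simp [pvInnerA, hin', hkp]
          · have hif' : PySem.Chars.isIn k.toList s.toList = false := by simpa using hin
            have hkf : k ∈ pending.filter (fun k => !(PySem.Str.isIn k s)) :=
              List.mem_filter.mpr ⟨hkp, by simp [hif']⟩
            rw [if_neg (fun hc => hin hc.2)]
            simp [pvInnerA, hif', hkf, hkp]
        · have hkf : k ∉ pending.filter (fun k => !(PySem.Str.isIn k s)) := by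
            intro hc; exact hkp (List.mem_filter.mp hc).1
          rw [if_neg (fun hc => hkp hc.1)]
          simp [hkf, hkp]

-- ===== A's loop: it computes pvScan =====

theorem pvA_fold (f : String → Option String) (ks : List String) :
    ∀ (done out : List String) (d : PySem.Dict String Bool),
    (∀ k ∈ ks, d.getD k false = decide (k ∉ done)) →
    (ks.foldl (fun (st : List String × PySem.Dict String Bool) el =>
      if st.2.getD el false then
        match f el with
        | some el2 => (st.1 ++ [el2], st.2.insert el false)
        | none => st
      else st) (out, d)).1
    = out ++ pvScan f ks done := by
  induction ks with
  | nil => intro done out d _; simp [pvScan]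
  | cons k ks ih =>
    intro done out d hinv
    have hk := hinv k (List.mem_cons_self)
    simp only [List.foldl_cons, pvScan]
    by_cases hdone : k ∈ done
    · have : d.getD k false = false := by simp [hk, hdone]
      rw [if_pos hdone]
      simp only [this, Bool.false_eq_true, if_false]
      exact ih done out d (fun k' hk' => hinv k' (List.mem_cons_of_mem _ hk'))
    · have hT : d.getD k false = true := by simp [hk, hdone]
      rw [if_neg hdone]
      simp only [hT, eq_self_iff_true, if_true]
      cases hf : f k with
      | some x =>
        simp only [hf]
        have := ih (k :: done) (out ++ [x]) (d.insert k false) (by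
          intro k' hk'
          by_cases he : k' = k
          · subst he; simp [PySem.Dict.getD_insert_self]
          · rw [PySem.Dict.getD_insert_of_ne d false false he]
            rw [hinv k' (List.mem_cons_of_mem _ hk')]
            simp [List.mem_cons, he])
        rw [this]; simp
      | none =>
        simp only [hf]
        exact ih done out d (fun k' hk' => hinv k' (List.mem_cons_of_mem _ hk'))

-- d = fromkeys(lista, True): every key of lista reads True
theorem pvFromkeys_getD (ks : List String) : ∀ (d : PySem.Dict String Bool) (k : String),
    (ks.foldl (fun d k => d.insert k true) d).getD k false
    = if k ∈ ks then true else d.getD k false := by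
  induction ks with
  | nil => intro d k; simp
  | cons k0 ks ih =>
    intro d k
    simp only [List.foldl_cons]
    rw [ih]
    by_cases hk : k ∈ ks
    · simp [hk, List.mem_cons]
    · by_cases he : k = k0
      · subst he; simp [hk, PySem.Dict.getD_insert_self]
      · rw [PySem.Dict.getD_insert_of_ne d true false he]
        simp [hk, List.mem_cons, he]

-- ===== pvScan = filterMap over pvDD =====

theorem pvScan_seen_none (f : String → Option String) (k : String) (hf : f k = none) :
    ∀ (ks : List String) (done : List String),
    (pvDD ks (k :: done)).filterMap f = (pvDD ks done).filterMap f := by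
  intro ks
  induction ks with
  | nil => intro done; rfl
  | cons j ks ih =>
    intro done
    simp only [pvDD]
    by_cases hj : j = k
    · subst hj
      rw [if_pos (List.mem_cons_self)]
      by_cases hd : j ∈ done
      · rw [if_pos hd]
        exact ih done
      · rw [if_neg hd]
        simp [hf]
    · by_cases hd : j ∈ done
      · rw [if_pos (List.mem_cons.mpr (Or.inr hd)), if_pos hd]
        exact ih done
      · rw [if_neg (by simp [List.mem_cons, hj, hd]), if_neg hd]
        simp only [List.filterMap_cons]
        have h1 : pvDD ks (j :: k :: done) = pvDD ks (k :: j :: done) :=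
          pvDD_congr ks _ _ (by intro x; simp [List.mem_cons]; tauto)
        rw [h1]
        cases hfj : f j <;> simp [ih (j :: done)]

theorem pvScan_eq_filterMap (f : String → Option String) (ks : List String) :
    ∀ (done : List String), pvScan f ks done = (pvDD ks done).filterMap f := by
  induction ks with
  | nil => intro done; rfl
  | cons k ks ih =>
    intro done
    simp only [pvScan, pvDD]
    by_cases hd : k ∈ done
    · rw [if_pos hd, if_pos hd]; exact ih done
    · rw [if_neg hd, if_neg hd]
      cases hf : f k with
      | some x => simp [List.filterMap_cons, hf, ih (k :: done)]
      | none =>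
        simp only [List.filterMap_cons, hf]
        rw [ih done, pvScan_seen_none f k hf ks done]

-- ===== VERDICT (by name: the statement is the Claim_ definition above) =====
theorem cleaning_duplicates_py_spec : Claim_equal_cleaning_duplicates_py := by
  intro aux_str _
  unfold Spec_cleaning_duplicates_py
  unfold cleaning_duplicates_py cleaning_duplicates_py_alt
  simp only []
  -- A side
  rw [pvA_fold (fun el => pvInnerA el aux_str) (aux_str.map (fun el => pvKeyOf el)) [] []
      ((aux_str.map (fun el => pvKeyOf el)).foldl (fun d k => d.insert k true) PySem.Dict.empty)
      (by intro k hk; rw [pvFromkeys_getD]; simp [hk])]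
  rw [pvScan_eq_filterMap]
  -- B side
  rw [show (PySem.Set.empty : PySem.Set String) = ([] : List String) from rfl]
  rw [pvB_keys aux_str []]
  simp only [List.nil_append]
  -- pointwise on the deduped key list
  congr 1
  apply List.filterMap_congr
  intro k hk
  rw [pvB2 k aux_str PySem.Dict.empty (pvDD (aux_str.map (fun el => pvKeyOf el)) [])
      (by intro j _; simp)]
  simp [hk]
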